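-- pv_equiv track=rewrite | github.com/hieunguyent12/ai | digits-classifier/src/neuralnetwork/data_loader.py | iris_labels_to_onehot
-- ===== SOURCE A (Python) =====
-- def iris_labels_to_onehot(labels):
--     labels_id = []
--     for label in labels:
--         if label not in labels_id:
--             labels_id.append(label)
--
--     encoded = []
--
--     for label in labels:
--         new_label = map(lambda l: 1 if l == label else 0, labels_id)
--         encoded.append(list(new_label))
--
--     return encoded
-- ===== SOURCE B (Python) =====
-- def iris_labels_to_onehot(labels):
--     # single online pass: rows are built incrementally; when a new label
--     # appears, every previously emitted row is widened with a trailing 0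
--     index = {}
--     encoded = []
--     for label in labels:
--         if label not in index:
--             for row in encoded:
--                 row.append(0)
--             index[label] = len(index)
--         vec = [0] * len(index)
--         vec[index[label]] = 1
--         encoded.append(vec)
--     return encoded
-- ===== Notes on version B (the rewrite author's own statement) =====
-- stated objective: alternative
-- what changed: Replaces A's two staged passes (list-membership dedup, then a rescan of the unique-label list per label) with a single online pass that maintains a label-to-position dict and the output rows together, widening all previously emitted rows with a trailing 0 whenever a new label first appears.
import Mathlib
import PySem

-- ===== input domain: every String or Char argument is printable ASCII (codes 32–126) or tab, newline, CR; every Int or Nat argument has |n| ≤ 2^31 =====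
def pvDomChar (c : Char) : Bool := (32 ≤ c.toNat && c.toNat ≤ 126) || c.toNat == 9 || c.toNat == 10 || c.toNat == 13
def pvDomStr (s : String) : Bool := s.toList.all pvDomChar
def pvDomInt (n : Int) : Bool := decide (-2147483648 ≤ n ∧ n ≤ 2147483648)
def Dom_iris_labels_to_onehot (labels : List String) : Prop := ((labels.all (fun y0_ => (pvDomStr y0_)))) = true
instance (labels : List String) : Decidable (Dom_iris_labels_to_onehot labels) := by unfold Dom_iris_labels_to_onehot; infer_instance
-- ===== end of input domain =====

-- B replaces A's two staged passes with one online pass that grows a label→position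
-- dict and the output rows together, widening earlier rows when a new label appears
-- (alternative decomposition; return values identical).

-- ===== PORT A =====
-- labels_id accumulation: for label in labels: if label not in labels_id: append
def irisIdsA (labels : List String) : List String :=
  labels.foldl (fun ids label => if label ∈ ids then ids else ids ++ [label]) []

def iris_labels_to_onehot (labels : List String) : List (List Int) :=
  let labels_id := irisIdsA labels
  labels.map (fun label => labels_id.map (fun l => if l == label then (1 : Int) else 0))

-- ===== PORT B =====
-- loop body: if label new, widen every emitted row with a 0 and record its position;
-- then vec = [0]*len(index); vec[index[label]] = 1; encoded.append(vec).
-- The stored position is always a Nat in [0, len(index)), so the Int→Nat cast and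
-- List.set are exact for Python's in-range assignment.
def irisStepB (st : PySem.Dict String Int × List (List Int)) (label : String) :
    PySem.Dict String Int × List (List Int) :=
  match st with
  | (d, enc) =>
    if d.contains label then
      (d, enc ++ [(List.replicate d.size (0 : Int)).set (d.getD label 0).toNat 1])
    else
      let d' := d.insert label (d.size : Int)
      (d', (enc.map (fun r => r ++ [0])) ++
           [(List.replicate d'.size (0 : Int)).set (d'.getD label 0).toNat 1])

def iris_labels_to_onehot_alt (labels : List String) : List (List Int) :=
  (labels.foldl irisStepB (PySem.Dict.empty, [])).2

-- ===== PRECONDITION & SPEC =====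
def Spec_iris_labels_to_onehot (labels : List String) (out : List (List Int)) : Prop := out = iris_labels_to_onehot_alt labels
instance (labels : List String) (out : List (List Int)) : Decidable (Spec_iris_labels_to_onehot labels out) := by unfold Spec_iris_labels_to_onehot; infer_instance

-- ===== CLAIM (what is proved, stated in full; the proofs are below) =====
def Claim_equal_iris_labels_to_onehot : Prop := ∀ (labels : List String), Dom_iris_labels_to_onehot labels → Spec_iris_labels_to_onehot labels (iris_labels_to_onehot labels)

-- ===== LEMMAS AND PROOFS =====

-- one-hot row of A for a given label over a unique-label list
def indRow (ids : List String) (label : String) : List Int :=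
  ids.map (fun l => if l == label then (1 : Int) else 0)

-- A's dedup list never loses elements and collects every processed label
theorem mem_foldl_ids (ls : List String) (ids : List String) (x : String) (hx : x ∈ ids) :
    x ∈ ls.foldl (fun ids label => if label ∈ ids then ids else ids ++ [label]) ids := by
  induction ls generalizing ids with
  | nil => exact hx
  | cons a t ih =>
      simp only [List.foldl_cons]
      split
      · exact ih ids hx
      · exact ih _ (List.mem_append_left _ hx)

theorem mem_foldl_ids_of_mem (ls : List String) (ids : List String) (x : String) (hx : x ∈ ls) :
    x ∈ ls.foldl (fun ids label => if label ∈ ids then ids else ids ++ [label]) ids := by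
  induction ls generalizing ids with
  | nil => cases hx
  | cons a t ih =>
      simp only [List.foldl_cons]
      rcases List.mem_cons.mp hx with rfl | hx'
      · by_cases h : x ∈ ids
        · simp only [if_pos h]; exact mem_foldl_ids t ids x h
        · simp only [if_neg h]
          exact mem_foldl_ids t _ x (by simp)
      · split <;> exact ih _ hx'

theorem irisIdsA_snoc (p : List String) (a : String) :
    irisIdsA (p ++ [a]) = if a ∈ irisIdsA p then irisIdsA p else irisIdsA p ++ [a] := by
  unfold irisIdsA
  rw [List.foldl_append]
  rfl

-- indicator row over ids of a label absent from ids is all zeros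
theorem map_indicator_eq_zero (ids : List String) (label : String) (h : label ∉ ids) :
    ids.map (fun l => if l == label then (1 : Int) else 0) = List.replicate ids.length 0 := by
  induction ids with
  | nil => rfl
  | cons a t ih =>
      simp only [List.mem_cons, not_or] at h
      have ha : (a == label) = false := by
        simp [beq_eq_false_iff_ne]
        exact fun e => h.1 e.symm
      simp only [List.map_cons, ha, Bool.false_eq_true, if_false, List.length_cons,
        List.replicate_succ, List.cons.injEq, true_and]
      exact ih h.2

-- one-hot by positional write equals one-hot by comparison scan, on a Nodup list
theorem onehot_set_eq_map (ids : List String) (label : String) (hnd : ids.Nodup) (hmem : label ∈ ids) :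
    (List.replicate ids.length (0 : Int)).set (ids.idxOf label) 1 = indRow ids label := by
  unfold indRow
  induction ids with
  | nil => cases hmem
  | cons a t ih =>
      by_cases hal : a = label
      · subst hal
        have hnt : a ∉ t := (List.nodup_cons.mp hnd).1
        simp only [List.length_cons, List.replicate_succ, List.idxOf_cons_self,
          List.set_cons_zero, List.map_cons, beq_self_eq_true, if_true, List.cons.injEq, true_and]
        exact (map_indicator_eq_zero t a hnt).symm
      · have hmt : label ∈ t := by
          rcases List.mem_cons.mp hmem with h | h
          · exact absurd h.symm hal
          · exact h
        have ha : (a == label) = false := by simp [beq_eq_false_iff_ne, hal]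
        have hidx : (a :: t).idxOf label = t.idxOf label + 1 := by
          simp [List.idxOf_cons, ha]
        simp only [List.length_cons, List.replicate_succ, hidx, List.set_cons_succ,
          List.map_cons, ha, Bool.false_eq_true, if_false, List.cons.injEq, true_and]
        exact ih (List.nodup_cons.mp hnd).2 hmt

-- widening an indicator row by a fresh label appends a 0
theorem indRow_snoc_fresh (ids : List String) (a label : String)
    (hlab : label ∈ ids) (ha : a ∉ ids) :
    indRow (ids ++ [a]) label = indRow ids label ++ [0] := by
  unfold indRow
  rw [List.map_append]
  have hne : a ≠ label := fun e => ha (e ▸ hlab)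
  simp [hne]

-- main loop invariant: after folding B's step over ls from a state matching prefix p,
-- the rows equal A's rows for the full list p ++ ls
theorem inv_foldl (ls : List String) (p : List String) (d : PySem.Dict String Int)
    (enc : List (List Int))
    (hk : d.keys = irisIdsA p) (hnd : (irisIdsA p).Nodup)
    (hg : ∀ x ∈ irisIdsA p, d.getD x 0 = ((irisIdsA p).idxOf x : Int))
    (hs : d.size = (irisIdsA p).length)
    (henc : enc = p.map (fun lab => indRow (irisIdsA p) lab)) :
    (ls.foldl irisStepB (d, enc)).2
      = (p ++ ls).map (fun lab => indRow (irisIdsA (p ++ ls)) lab) := by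
  induction ls generalizing p d enc with
  | nil => simpa using henc
  | cons a t ih =>
      have hreassoc : p ++ a :: t = (p ++ [a]) ++ t := by simp
      have hc : d.contains a = decide (a ∈ irisIdsA p) := by
        rw [PySem.Dict.contains_eq_decide_mem_keys, hk]
      simp only [List.foldl_cons]
      by_cases hmem : a ∈ irisIdsA p
      · have hids : irisIdsA (p ++ [a]) = irisIdsA p := by
          rw [irisIdsA_snoc, if_pos hmem]
        have hstep : irisStepB (d, enc)  a
            = (d, enc ++ [(List.replicate d.size (0 : Int)).set (d.getD a 0).toNat 1]) := by
          simp [irisStepB, hc, hmem]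
        rw [hstep, hreassoc]
        refine ih (p ++ [a]) d _ (by rw [hids]; exact hk) (by rw [hids]; exact hnd)
          (by rw [hids]; exact hg) (by rw [hids]; exact hs) ?_
        rw [hids, henc, List.map_append, List.map_singleton]
        congr 1
        rw [hs, hg a hmem, Int.toNat_natCast, onehot_set_eq_map _ a hnd hmem]
      · have hids : irisIdsA (p ++ [a]) = irisIdsA p ++ [a] := by
          rw [irisIdsA_snoc, if_neg hmem]
        have hcon : d.contains a = false := by simp [hc, hmem]
        have hstep : irisStepB (d, enc) a
            = (d.insert a (d.size : Int),
               (enc.map (fun r => r ++ [0])) ++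
                 [(List.replicate (d.insert a (d.size : Int)).size (0 : Int)).set
                    ((d.insert a (d.size : Int)).getD a 0).toNat 1]) := by
          simp [irisStepB, hcon]
        rw [hstep, hreassoc]
        have hnd' : (irisIdsA (p ++ [a])).Nodup := by
          rw [hids]
          exact List.Nodup.append hnd (List.nodup_singleton a) (by simpa using hmem)
        have hsize' : (d.insert a (d.size : Int)).size = (irisIdsA (p ++ [a])).length := by
          rw [PySem.Dict.size_insert, hcon, hids]
          simp [hs]
        have hg' : ∀ x ∈ irisIdsA (p ++ [a]),
            (d.insert a (d.size : Int)).getD x 0 = ((irisIdsA (p ++ [a])).idxOf x : Int) := by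
          rw [hids]
          intro x hx
          rcases List.mem_append.mp hx with hx' | hx'
          · have hne : x ≠ a := fun h => hmem (h ▸ hx')
            rw [PySem.Dict.getD_insert_of_ne d _ _ hne, hg x hx',
              List.idxOf_append_of_mem hx']
          · have hxa : x = a := by simpa using hx'
            subst hxa
            rw [PySem.Dict.getD_insert_self, hs]
            have : (irisIdsA p ++ [x]).idxOf x = (irisIdsA p).length := by
              rw [List.idxOf_append_of_notMem hmem]
              simp
            rw [this]
        refine ih (p ++ [a]) _ _ ?_ hnd' hg' hsize' ?_
        · rw [PySem.Dict.keys_insert_of_not_contains d _ (by simp [hcon]), hk, hids]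
        · rw [henc, List.map_append, List.map_singleton, List.map_map]
          congr 1
          · -- widened previous rows
            apply List.map_congr_left
            intro lab hlab
            have hlabmem : lab ∈ irisIdsA p := mem_foldl_ids_of_mem p [] lab hlab
            simp only [Function.comp]
            rw [hids, indRow_snoc_fresh _ _ _ hlabmem hmem]
          · -- the new row for a
            have hamem : a ∈ irisIdsA (p ++ [a]) := by rw [hids]; simp
            rw [hsize', PySem.Dict.getD_insert_self, hs]
            have hidx : (irisIdsA (p ++ [a])).idxOf a = (irisIdsA p).length := by
              rw [hids, List.idxOf_append_of_notMem hmem]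
              simp
            rw [← hidx, Int.toNat_natCast] at *
            rw [onehot_set_eq_map _ a hnd' hamem]

-- ===== VERDICT (by name: the statement is the Claim_ definition above) =====
theorem iris_labels_to_onehot_spec : Claim_equal_iris_labels_to_onehot := by
  intro labels _
  unfold Spec_iris_labels_to_onehot iris_labels_to_onehot iris_labels_to_onehot_alt
  have h := inv_foldl labels [] PySem.Dict.empty [] rfl List.nodup_nil (by simp) rfl rfl
  simp only [List.nil_append, indRow] at h
  exact h.symm
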